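-- pv_equiv track=rewrite | github.com/artoo-corporation/D2-Python | scripts/generate_notice.py | parse_third_party_blocks
-- ===== SOURCE A (Python) =====
-- def parse_third_party_blocks(text: str) -> list[dict[str, str]]:
--     entries: list[dict[str, str]] = []
--     current: dict[str, str] = {}
--     for line in text.splitlines():
--         if line.strip() == "---":
--             if current:
--                 entries.append(current)
--                 current = {}
--             continue
--         if line.startswith("Package:"):
--             current["Package"] = line.split(":", 1)[1].strip()
--         elif line.startswith("Version:"):
--             current["Version"] = line.split(":", 1)[1].strip()
--         elif line.startswith("License:"):
--             current["License"] = line.split(":", 1)[1].strip()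
--     if current:
--         entries.append(current)
--     return entries
-- ===== SOURCE B (Python) =====
-- def parse_third_party_blocks(text: str) -> list[dict[str, str]]:
--     # Phase 1: split the lines into blocks at '---' separator lines.
--     blocks: list[list[str]] = [[]]
--     for line in text.splitlines():
--         if line.strip() == "---":
--             blocks.append([])
--         else:
--             blocks[-1].append(line)
--     # Phase 2: parse each block into a dict; keep only non-empty ones.
--     def parse_block(block: list[str]) -> dict[str, str]:
--         d: dict[str, str] = {}
--         for line in block:
--             for key in ("Package", "Version", "License"):
--                 if line.startswith(key + ":"):
--                     d[key] = line.split(":", 1)[1].strip()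
--         return d
--     return [d for d in map(parse_block, blocks) if d]
-- ===== Notes on version B (the rewrite author's own statement) =====
-- stated objective: alternative
-- what changed: B replaces A's single stateful loop (one dict accumulator flushed at separators) with a two-phase structure: first segment the lines into blocks at '---' lines, then parse each block independently with a fold over the three key names, keeping non-empty dicts.
import Mathlib
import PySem

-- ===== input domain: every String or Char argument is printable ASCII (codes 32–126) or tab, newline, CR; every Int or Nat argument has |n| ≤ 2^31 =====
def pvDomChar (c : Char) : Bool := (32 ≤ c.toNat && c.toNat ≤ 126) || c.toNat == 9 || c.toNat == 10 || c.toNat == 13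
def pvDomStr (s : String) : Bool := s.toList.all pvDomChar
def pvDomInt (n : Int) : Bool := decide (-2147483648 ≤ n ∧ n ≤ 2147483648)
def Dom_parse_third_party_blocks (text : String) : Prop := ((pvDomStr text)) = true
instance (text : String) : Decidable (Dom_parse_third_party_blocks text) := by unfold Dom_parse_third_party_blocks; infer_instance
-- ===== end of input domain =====

-- B restructures A's single stateful accumulator loop into two phases (segment the
-- lines at '---', then parse each block independently); same result, same O(n) cost.

-- ===== PORT A =====
-- shared helper: line.split(":", 1)[1].strip()  (index 1 exists whenever it is used:
-- the callers only reach it when line starts with "<Key>:", so the split has 2 pieces)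
def pvFieldVal (line : String) : String :=
  PySem.Str.strip (((PySem.Str.splitMax? line ":" 1).getD []).getD 1 "")

def pvStepA (st : List (List (String × String)) × PySem.Dict String String) (line : String) :
    List (List (String × String)) × PySem.Dict String String :=
  if PySem.Str.strip line = "---" then
    if st.2.items.isEmpty then st else (st.1 ++ [st.2.items], PySem.Dict.empty)
  else if PySem.Str.startswith line "Package:" then (st.1, st.2.insert "Package" (pvFieldVal line))
  else if PySem.Str.startswith line "Version:" then (st.1, st.2.insert "Version" (pvFieldVal line))
  else if PySem.Str.startswith line "License:" then (st.1, st.2.insert "License" (pvFieldVal line))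
  else st

def parse_third_party_blocks (text : String) : List (List (String × String)) :=
  let st := (PySem.Str.splitlines text).foldl pvStepA ([], PySem.Dict.empty)
  if st.2.items.isEmpty then st.1 else st.1 ++ [st.2.items]

-- ===== PORT B =====
-- phase 1: blocks[-1].append / start a new block at '---'
def pvSegStep (st : List (List String) × List String) (line : String) :
    List (List String) × List String :=
  if PySem.Str.strip line = "---" then (st.1 ++ [st.2], []) else (st.1, st.2 ++ [line])

def pvSegments (lines : List String) : List (List String) :=
  let st := lines.foldl pvSegStep ([], [])
  st.1 ++ [st.2]

-- phase 2: for key in ("Package","Version","License"): if line.startswith(key + ":") …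
def pvKeyStep (line : String) (d : PySem.Dict String String) (key : String) :
    PySem.Dict String String :=
  if PySem.Str.startswith line (key ++ ":") then d.insert key (pvFieldVal line) else d

def pvParseBlock (block : List String) : List (String × String) :=
  (block.foldl (fun d line => ["Package", "Version", "License"].foldl (pvKeyStep line) d)
    PySem.Dict.empty).items

def parse_third_party_blocks_alt (text : String) : List (List (String × String)) :=
  (((pvSegments (PySem.Str.splitlines text)).map pvParseBlock).filter (fun d => !d.isEmpty))

-- ===== PRECONDITION & SPEC =====
def Spec_parse_third_party_blocks (text : String) (out : List (List (String × String))) : Prop := out = parse_third_party_blocks_alt text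
instance (text : String) (out : List (List (String × String))) : Decidable (Spec_parse_third_party_blocks text out) := by unfold Spec_parse_third_party_blocks; infer_instance

-- ===== CLAIM (what is proved, stated in full; the proofs are below) =====
def Claim_equal_parse_third_party_blocks : Prop := ∀ (text : String), Dom_parse_third_party_blocks text → Spec_parse_third_party_blocks text (parse_third_party_blocks text)

-- ===== LEMMAS AND PROOFS =====

-- the non-separator body of A's loop, as a dict transformer
def pvLineStep (d : PySem.Dict String String) (line : String) : PySem.Dict String String :=
  if PySem.Str.startswith line "Package:" then d.insert "Package" (pvFieldVal line)
  else if PySem.Str.startswith line "Version:" then d.insert "Version" (pvFieldVal line)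
  else if PySem.Str.startswith line "License:" then d.insert "License" (pvFieldVal line)
  else d

-- reference semantics both ports are reduced to
def pvRun (cur : PySem.Dict String String) : List String → List (List (String × String))
  | [] => if cur.items.isEmpty then [] else [cur.items]
  | line :: ls =>
      if PySem.Str.strip line = "---" then
        (if cur.items.isEmpty then [] else [cur.items]) ++ pvRun PySem.Dict.empty ls
      else pvRun (pvLineStep cur line) ls

theorem sw_excl {line : String} (p q : String) (hlen : p.toList.length = q.toList.length)
    (hne : p.toList ≠ q.toList) (hp : PySem.Str.startswith line p = true) :
    PySem.Str.startswith line q = false := by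
  by_contra h
  rw [Bool.not_eq_false] at h
  rw [PySem.Str.startswith_eq, PySem.Chars.startswith_iff] at hp h
  exact hne (List.IsPrefix.eq_of_length
    (List.prefix_of_prefix_length_le hp h (le_of_eq hlen)) hlen)

set_option maxHeartbeats 1000000 in
theorem key_fold (line : String) (d : PySem.Dict String String) :
    List.foldl (pvKeyStep line) d ["Package", "Version", "License"] = pvLineStep d line := by
  have hpv : ("Package" : String) ++ ":" = "Package:" := rfl
  have hvv : ("Version" : String) ++ ":" = "Version:" := rfl
  have hlv : ("License" : String) ++ ":" = "License:" := rfl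
  simp only [List.foldl_cons, List.foldl_nil, pvKeyStep, pvLineStep, hpv, hvv, hlv]
  by_cases hP : PySem.Str.startswith line "Package:" = true
  · rw [hP, sw_excl "Package:" "Version:" (by decide) (by decide) hP,
      sw_excl "Package:" "License:" (by decide) (by decide) hP]
    simp
  · rw [Bool.not_eq_true] at hP
    by_cases hV : PySem.Str.startswith line "Version:" = true
    · rw [hP, hV, sw_excl "Version:" "License:" (by decide) (by decide) hV]
      simp
    · rw [Bool.not_eq_true] at hV
      rw [hP, hV]
      simp

theorem empty_of_items_nil {d : PySem.Dict String String} (h : d.items.isEmpty = true) :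
    d = PySem.Dict.empty := by
  apply PySem.Dict.ext
  simpa [List.isEmpty_iff] using h

theorem A_eq_run : ∀ (lines : List String) (entries : List (List (String × String)))
    (cur : PySem.Dict String String),
    (if (List.foldl pvStepA (entries, cur) lines).2.items.isEmpty then
        (List.foldl pvStepA (entries, cur) lines).1
      else (List.foldl pvStepA (entries, cur) lines).1 ++
        [(List.foldl pvStepA (entries, cur) lines).2.items]) =
      entries ++ pvRun cur lines := by
  intro lines
  induction lines with
  | nil => intro entries cur; by_cases h : cur.items.isEmpty = true <;> simp [pvRun, h]
  | cons line ls ih =>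
    intro entries cur
    rw [List.foldl_cons]
    simp only [pvStepA, pvRun]
    by_cases hsep : PySem.Str.strip line = "---"
    · rw [if_pos hsep, if_pos hsep]
      by_cases hemp : cur.items.isEmpty = true
      · rw [if_pos hemp, if_pos hemp]
        simpa [empty_of_items_nil hemp] using ih entries cur
      · rw [if_neg hemp, if_neg hemp]
        simpa using ih (entries ++ [cur.items]) PySem.Dict.empty
    · rw [if_neg hsep, if_neg hsep]
      have hpair :
          (if PySem.Str.startswith line "Package:" = true then
              (((entries, cur) : List (List (String × String)) × PySem.Dict String String).1,
                ((entries, cur) : List (List (String × String)) × PySem.Dict String String).2.insert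
                  "Package" (pvFieldVal line))
            else if PySem.Str.startswith line "Version:" = true then
              ((entries, cur).1, (entries, cur).2.insert "Version" (pvFieldVal line))
            else if PySem.Str.startswith line "License:" = true then
              ((entries, cur).1, (entries, cur).2.insert "License" (pvFieldVal line))
            else (entries, cur)) = (entries, pvLineStep cur line) := by
        unfold pvLineStep; split_ifs <;> rfl
      rw [hpair]
      exact ih entries (pvLineStep cur line)

theorem blockDict_append (b : List String) (line : String) :
    List.foldl (fun d line => List.foldl (pvKeyStep line) d ["Package", "Version", "License"])
        PySem.Dict.empty (b ++ [line]) =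
      pvLineStep (List.foldl (fun d line => List.foldl (pvKeyStep line) d
        ["Package", "Version", "License"]) PySem.Dict.empty b) line := by
  rw [List.foldl_append]
  exact key_fold line _

theorem B_eq_run : ∀ (lines : List String) (done : List (List String)) (curb : List String),
    (((List.foldl pvSegStep (done, curb) lines).1 ++
        [(List.foldl pvSegStep (done, curb) lines).2]).map pvParseBlock).filter
          (fun d => !d.isEmpty) =
      (done.map pvParseBlock).filter (fun d => !d.isEmpty) ++
        pvRun (List.foldl (fun d line => List.foldl (pvKeyStep line) d
          ["Package", "Version", "License"]) PySem.Dict.empty curb) lines := by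
  intro lines
  induction lines with
  | nil =>
    intro done curb
    simp only [List.foldl_nil, pvRun, List.map_append, List.filter_append, List.map_cons,
      List.map_nil, List.filter_cons, pvParseBlock]
    by_cases h : (List.foldl (fun d line => List.foldl (pvKeyStep line) d
        ["Package", "Version", "License"]) PySem.Dict.empty curb).items.isEmpty = true <;>
      simp [*]
  | cons line ls ih =>
    intro done curb
    rw [List.foldl_cons]
    simp only [pvSegStep, pvRun]
    by_cases hsep : PySem.Str.strip line = "---"
    · rw [if_pos hsep, if_pos hsep]
      rw [ih (done ++ [curb]) []]
      simp only [List.map_append, List.filter_append, List.map_cons, List.map_nil,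
        List.filter_cons, List.foldl_nil, pvParseBlock, List.append_assoc]
      by_cases h : (List.foldl (fun d line => List.foldl (pvKeyStep line) d
          ["Package", "Version", "License"]) PySem.Dict.empty curb).items.isEmpty = true <;>
        simp [*]
    · rw [if_neg hsep, if_neg hsep]
      rw [ih done (curb ++ [line]), blockDict_append]

-- ===== VERDICT (by name: the statement is the Claim_ definition above) =====
theorem parse_third_party_blocks_spec : Claim_equal_parse_third_party_blocks := by
  intro text _
  unfold Spec_parse_third_party_blocks parse_third_party_blocks parse_third_party_blocks_alt
    pvSegments
  rw [B_eq_run (PySem.Str.splitlines text) [] []]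
  simpa using A_eq_run (PySem.Str.splitlines text) [] PySem.Dict.empty
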